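-- pv_equiv track=rewrite | github.com/richardnguyen0715/tgng.leet | byType/stack/Reverse Letters Then Special Characters in a String.py | reverseByType
-- ===== SOURCE A (Python) =====
-- def reverseByType(s: str) -> str:
--
--     letters = []
--     lettersIdx = []
--     special = []
--     specialIdx = []
--
--     for idx, char in enumerate(s):
--
--         if ord('a') <= ord(char) <= ord('z'):
--             letters.append(char)
--             lettersIdx.append(idx)
--         else:
--             special.append(char)
--             specialIdx.append(idx)
--
--     res = [''] * len(s)
--     letters = letters[::-1]
--     special = special[::-1]
--
--     m, n = 0, 0
--     for i in lettersIdx: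
--         res[i] = letters[m]
--         m += 1
--     for j in specialIdx:
--         res[j] = special[n]
--         n += 1
--
--     return "".join(res)
-- ===== SOURCE B (Python) =====
-- def _reverse_class(chars, want_letter):
--     i, j = 0, len(chars) - 1
--     while i < j:
--         while i < j and (ord('a') <= ord(chars[i]) <= ord('z')) != want_letter:
--             i += 1
--         while i < j and (ord('a') <= ord(chars[j]) <= ord('z')) != want_letter:
--             j -= 1
--         if i < j:
--             chars[i], chars[j] = chars[j], chars[i]
--             i += 1
--             j -= 1
--
--
-- def reverseByType(s: str) -> str:
--     chars = list(s)
--     _reverse_class(chars, True)   # reverse the lowercase letters in place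
--     _reverse_class(chars, False)  # reverse everything else in place
--     return "".join(chars)
-- ===== Notes on version B (the rewrite author's own statement) =====
-- stated objective: alternative
-- what changed: A classifies each char, records index lists for letters and specials, reverses the two collected lists and scatters them back by index into a preallocated array; B allocates no auxiliary lists at all: it mutates the char list in place with two classic two-pointer swap passes (advance i past non-targets, retreat j past non-targets, swap), once for lowercase letters and once for the other characters.
import Mathlib
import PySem

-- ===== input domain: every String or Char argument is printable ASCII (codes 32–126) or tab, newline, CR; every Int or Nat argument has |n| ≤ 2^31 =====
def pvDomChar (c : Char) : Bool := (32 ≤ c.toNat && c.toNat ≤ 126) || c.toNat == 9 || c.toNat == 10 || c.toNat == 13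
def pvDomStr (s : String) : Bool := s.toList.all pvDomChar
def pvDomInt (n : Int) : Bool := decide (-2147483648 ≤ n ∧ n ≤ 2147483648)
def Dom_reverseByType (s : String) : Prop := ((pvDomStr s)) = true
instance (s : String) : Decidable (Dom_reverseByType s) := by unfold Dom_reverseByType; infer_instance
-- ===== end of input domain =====

-- B replaces A's classify/record-index-lists/reverse/scatter pipeline with two in-place
-- two-pointer swap passes over the char list, no auxiliary lists; same cost (objective: alternative).

-- ord('a') <= ord(char) <= ord('z'), exact: Char.toNat is the code point
def pvIsLow (c : Char) : Bool := ('a'.toNat ≤ c.toNat) && (c.toNat ≤ 'z'.toNat)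

-- ===== PORT A =====
-- the enumerate-loop of A: returns (letters, lettersIdx, special, specialIdx), i the running index
def pvCollect (i : Nat) : List Char → (List Char × List Nat × List Char × List Nat)
  | [] => ([], [], [], [])
  | c :: t =>
    let (l, li, sp, si) := pvCollect (i + 1) t
    if pvIsLow c then (c :: l, i :: li, sp, si) else (l, li, c :: sp, i :: si)

-- one of A's scatter loops: 'for i in idxs: res[i] = vals[m]; m += 1' (index always in range)
def pvScat (vals : List Char) : List Nat → Nat → List String → List String
  | [], _, res => res
  | i :: is, m, res => pvScat vals is (m + 1) (res.set i (String.ofList [vals.getD m 'a']))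

def reverseByType (s : String) : String :=
  let l := s.toList
  let (letters, lettersIdx, special, specialIdx) := pvCollect 0 l
  let res := List.replicate l.length ""
  let letters := (PySem.List.slice? letters none none (-1)).getD []   -- letters[::-1]
  let special := (PySem.List.slice? special none none (-1)).getD []   -- special[::-1]
  let res := pvScat letters lettersIdx 0 res
  let res := pvScat special specialIdx 0 res
  PySem.Str.join "" res

-- ===== PORT B =====
-- Source B's first inner while: advance i while i < j and class(chars[i]) != want
def pvSkipF (want : Bool) (l : List Char) (i j : Nat) : Nat :=
  if _h : i < j ∧ (pvIsLow (l.getD i ' ') != want) then pvSkipF want l (i + 1) j else i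
termination_by j - i
decreasing_by omega

-- Source B's second inner while: retreat j while i < j and class(chars[j]) != want
def pvSkipB (want : Bool) (l : List Char) (i j : Nat) : Nat :=
  if _h : i < j ∧ (pvIsLow (l.getD j ' ') != want) then pvSkipB want l i (j - 1) else j
termination_by j - i
decreasing_by omega

-- bounds cited by pvTpLoop's decreasing_by
theorem pvSkipF_ge (want : Bool) (l : List Char) (i j : Nat) : i ≤ pvSkipF want l i j := by
  unfold pvSkipF
  split
  · have := pvSkipF_ge want l (i + 1) j; omega
  · omega
termination_by j - i
decreasing_by omega

theorem pvSkipB_le (want : Bool) (l : List Char) (i j : Nat) : pvSkipB want l i j ≤ j := by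
  unfold pvSkipB
  split
  · have := pvSkipB_le want l i (j - 1); omega
  · omega
termination_by j - i
decreasing_by omega

-- Source B's outer while: skip, skip, then swap chars[i], chars[j] and step inwards
def pvTpLoop (want : Bool) (l : List Char) (i j : Nat) : List Char :=
  if _h : i < j then
    let i' := pvSkipF want l i j
    let j' := pvSkipB want l i' j
    if _h2 : i' < j' then
      pvTpLoop want ((l.set i' (l.getD j' ' ')).set j' (l.getD i' ' ')) (i' + 1) (j' - 1)
    else l
  else l
termination_by j - i
decreasing_by
  have h1 := pvSkipF_ge want l i j
  have h2 := pvSkipB_le want l (pvSkipF want l i j) j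
  omega

def reverseByType_alt (s : String) : String :=
  let chars := s.toList
  let chars := pvTpLoop true chars 0 (chars.length - 1)    -- _reverse_class(chars, True)
  let chars := pvTpLoop false chars 0 (chars.length - 1)   -- _reverse_class(chars, False)
  PySem.Str.join "" (chars.map (fun c => String.ofList [c]))

-- ===== PRECONDITION & SPEC =====
def Spec_reverseByType (s : String) (out : String) : Prop := out = reverseByType_alt s
instance (s : String) (out : String) : Decidable (Spec_reverseByType s out) := by unfold Spec_reverseByType; infer_instance

-- ===== CLAIM (what is proved, stated in full; the proofs are below) =====
def Claim_equal_reverseByType : Prop := ∀ (s : String), Dom_reverseByType s → Spec_reverseByType s (reverseByType s)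

-- ===== LEMMAS AND PROOFS =====

-- common reference value: positionwise merge of the two class streams
def pvMerge : List Char → List Char → List Char → List Char
  | [], _, _ => []
  | c :: t, ls, ss =>
    if pvIsLow c then
      match ls with
      | a :: ls' => a :: pvMerge t ls' ss
      | [] => []
    else
      match ss with
      | b :: ss' => b :: pvMerge t ls ss'
      | [] => []

-- ---------- A side: collect/reverse/scatter = pvMerge ----------

def pvPosL (i : Nat) : List Char → List Nat
  | [] => []
  | c :: t => if pvIsLow c then i :: pvPosL (i + 1) t else pvPosL (i + 1) t

def pvPosS (i : Nat) : List Char → List Nat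
  | [] => []
  | c :: t => if pvIsLow c then pvPosS (i + 1) t else i :: pvPosS (i + 1) t

theorem pvCollect_spec (l : List Char) (i : Nat) :
    pvCollect i l = (l.filter pvIsLow, pvPosL i l, l.filter (fun c => !(pvIsLow c)), pvPosS i l) := by
  induction l generalizing i with
  | nil => rfl
  | cons c t ih =>
    simp only [pvCollect, pvPosL, pvPosS, List.filter, ih]
    cases h : pvIsLow c <;> simp

theorem pvPosL_ge (l : List Char) (i : Nat) : ∀ j ∈ pvPosL i l, i ≤ j := by
  induction l generalizing i with
  | nil => simp [pvPosL]
  | cons c t ih =>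
    intro j hj
    simp only [pvPosL] at hj
    split at hj
    · rcases List.mem_cons.1 hj with h | h
      · omega
      · have := ih (i + 1) j h; omega
    · have := ih (i + 1) j hj; omega

theorem pvScat_shift (a : Char) (vs : List Char) (is : List Nat) (m : Nat) (res : List String) :
    pvScat (a :: vs) is (m + 1) res = pvScat vs is m res := by
  induction is generalizing m res with
  | nil => rfl
  | cons i it ih => simp only [pvScat, List.getD_cons_succ, ih]

theorem pvScat_set_comm (vs : List Char) (is : List Nat) (m k : Nat) (v : String) (res : List String)
    (h : ∀ i ∈ is, i ≠ k) :
    pvScat vs is m (res.set k v) = (pvScat vs is m res).set k v := by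
  induction is generalizing m res with
  | nil => rfl
  | cons i it ih =>
    simp only [pvScat]
    rw [List.set_comm _ _ (Ne.symm (h i (List.mem_cons_self))), ih]
    intro j hj; exact h j (List.mem_cons_of_mem _ hj)

theorem pvTakeSet (l : List String) (k : Nat) (v : String) (h : k < l.length) :
    (l.set k v).take (k + 1) = l.take k ++ [v] := by
  rw [List.set_eq_take_append_cons_drop, if_pos h, List.take_append]
  simp [List.length_take, Nat.min_eq_left h.le]

-- the core of the A side: the two scatter passes build exactly the merged stream
theorem pvMain (t : List Char) (k : Nat) (res : List String) (ls ss : List Char)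
    (hls : ls.length = t.countP pvIsLow)
    (hss : ss.length = t.countP (fun c => !(pvIsLow c)))
    (hres : res.length = k + t.length) :
    pvScat ss (pvPosS k t) 0 (pvScat ls (pvPosL k t) 0 res)
      = res.take k ++ (pvMerge t ls ss).map (fun c => String.ofList [c]) := by
  induction t generalizing k res ls ss with
  | nil =>
    simp only [List.length_nil, Nat.add_zero] at hres
    simp only [pvPosL, pvPosS, pvScat, pvMerge, List.map_nil, List.append_nil]
    exact (List.take_of_length_le (by omega)).symm
  | cons c t ih =>
    have hklt : k < res.length := by simp at hres; omega
    by_cases hc : pvIsLow c = true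
    · obtain ⟨a, ls', rfl⟩ : ∃ a ls', ls = a :: ls' := by
        cases ls with
        | nil => exfalso; rw [List.countP_cons_of_pos hc] at hls; simp at hls
        | cons a ls' => exact ⟨a, ls', rfl⟩
      simp only [pvPosL, pvPosS, pvMerge, hc, if_pos]
      simp only [pvScat, List.getD_cons_zero, pvScat_shift]
      rw [ih (k + 1) (res.set k (String.ofList [a])) ls' ss
            (by rw [List.countP_cons_of_pos hc] at hls; simpa using hls)
            (by rw [List.countP_cons_of_neg (by simp [hc])] at hss; exact hss)
            (by simp at hres ⊢; omega)]
      rw [pvTakeSet res k _ hklt]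
      simp
    · obtain ⟨b, ss', rfl⟩ : ∃ b ss', ss = b :: ss' := by
        cases ss with
        | nil =>
          exfalso
          rw [List.countP_cons_of_pos (by simp [hc])] at hss
          simp at hss
        | cons b ss' => exact ⟨b, ss', rfl⟩
      simp only [pvPosL, pvPosS, pvMerge, hc, if_neg, Bool.not_eq_true]
      simp only [pvScat, List.getD_cons_zero, pvScat_shift]
      have hcomm : pvScat ls (pvPosL (k + 1) t) 0 (res.set k (String.ofList [b]))
          = (pvScat ls (pvPosL (k + 1) t) 0 res).set k (String.ofList [b]) := by
        apply pvScat_set_comm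
        intro i hi
        have := pvPosL_ge t (k + 1) i hi; omega
      rw [← hcomm]
      rw [ih (k + 1) (res.set k (String.ofList [b])) ls ss'
            (by rw [List.countP_cons_of_neg (by simpa using hc)] at hls; exact hls)
            (by rw [List.countP_cons_of_pos (by simp [hc])] at hss; simpa using hss)
            (by simp at hres ⊢; omega)]
      rw [pvTakeSet res k _ hklt]
      simp

-- ---------- B side: the two-pointer passes = pvMerge ----------

-- fill the p-positions of t from the stream str (stream empty: keep the char; never hit in use)
def pvFill (p : Char → Bool) : List Char → List Char → List Char
  | [], _ => []
  | c :: t, str =>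
    if p c then
      match str with
      | a :: r => a :: pvFill p t r
      | [] => c :: pvFill p t []
    else c :: pvFill p t str

-- "reverse the p-elements of t in place", as a value
def pvRvp (p : Char → Bool) (t : List Char) : List Char := pvFill p t ((t.filter p).reverse)

theorem pvFill_empty (p : Char → Bool) (t : List Char) : pvFill p t [] = t := by
  induction t with
  | nil => rfl
  | cons c t ih => by_cases h : p c <;> simp [pvFill, h, ih]

theorem pvFill_append (p : Char → Bool) (t u str str2 : List Char)
    (h : str.length = t.countP p) :
    pvFill p (t ++ u) (str ++ str2) = pvFill p t str ++ pvFill p u str2 := by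
  induction t generalizing str with
  | nil =>
    have : str = [] := List.length_eq_zero_iff.mp (by simpa using h)
    simp [this, pvFill]
  | cons c t ih =>
    by_cases hc : p c
    · obtain ⟨a, str', rfl⟩ : ∃ a str', str = a :: str' := by
        cases str with
        | nil => exfalso; rw [List.countP_cons_of_pos hc] at h; simp at h
        | cons a str' => exact ⟨a, str', rfl⟩
      rw [List.countP_cons_of_pos hc] at h
      simp only [List.cons_append, pvFill, hc, if_pos]
      rw [ih str' (by simpa using h)]
    · rw [List.countP_cons_of_neg (by simpa using hc)] at h
      simp only [List.cons_append, pvFill, hc, if_neg, Bool.not_eq_true]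
      rw [ih str h]

theorem pvRvp_nop (p : Char → Bool) (t : List Char) (h : t.filter p = []) : pvRvp p t = t := by
  simp [pvRvp, h, pvFill_empty]

theorem pvRvp_left (p : Char → Bool) (A t : List Char) (hA : ∀ c ∈ A, p c = false) :
    pvRvp p (A ++ t) = A ++ pvRvp p t := by
  have hfA : A.filter p = [] := List.filter_eq_nil_iff.mpr (by intro c hc; simp [hA c hc])
  unfold pvRvp
  rw [List.filter_append, hfA, List.nil_append,
    show (t.filter p).reverse = [] ++ (t.filter p).reverse from rfl,
    pvFill_append p A t [] _ (by simp [List.countP_eq_length_filter, hfA]), pvFill_empty]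
  simp

theorem pvRvp_right (p : Char → Bool) (t B : List Char) (hB : ∀ c ∈ B, p c = false) :
    pvRvp p (t ++ B) = pvRvp p t ++ B := by
  have hfB : B.filter p = [] := List.filter_eq_nil_iff.mpr (by intro c hc; simp [hB c hc])
  unfold pvRvp
  rw [List.filter_append, hfB, List.append_nil,
    show (t.filter p).reverse = (t.filter p).reverse ++ [] by simp,
    pvFill_append p t B _ [] (by simp [List.countP_eq_length_filter]), pvFill_empty]
  simp

theorem pvRvp_single (p : Char → Bool) (x : Char) (B : List Char)
    (hx : p x = true) (hB : ∀ c ∈ B, p c = false) : pvRvp p (x :: B) = x :: B := by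
  rw [show (x :: B) = [x] ++ B from rfl, pvRvp_right p [x] B hB]
  simp [pvRvp, pvFill, List.filter_cons, hx, pvFill_empty]

theorem pvRvp_swap (p : Char → Bool) (x y : Char) (M : List Char)
    (hx : p x = true) (hy : p y = true) :
    pvRvp p (x :: (M ++ [y])) = y :: (pvRvp p M ++ [x]) := by
  have hf : ((x :: (M ++ [y])).filter p).reverse
      = y :: ((M.filter p).reverse ++ [x]) := by
    simp [List.filter_cons, List.filter_append, hx, hy]
  unfold pvRvp
  rw [hf]
  simp only [pvFill, hx, if_pos]
  rw [pvFill_append p M [y] _ [x] (by simp [List.countP_eq_length_filter])]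
  simp [pvFill, hy]

-- decompose a list around its first / last p-element
theorem pvFindP (p : Char → Bool) (l : List Char) (h : l.filter p ≠ []) :
    ∃ A x R, l = A ++ x :: R ∧ p x = true ∧ ∀ c ∈ A, p c = false := by
  induction l with
  | nil => simp at h
  | cons c t ih =>
    by_cases hc : p c
    · exact ⟨[], c, t, by simp, hc, by simp⟩
    · have ht : t.filter p ≠ [] := by simpa [List.filter_cons, hc] using h
      obtain ⟨A, x, R, rfl, hx, hA⟩ := ih ht
      refine ⟨c :: A, x, R, by simp, hx, ?_⟩
      intro d hd
      rcases List.mem_cons.1 hd with rfl | hd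
      · simpa using hc
      · exact hA d hd

theorem pvFindPLast (p : Char → Bool) (l : List Char) (h : l.filter p ≠ []) :
    ∃ M y B, l = M ++ y :: B ∧ p y = true ∧ ∀ c ∈ B, p c = false := by
  have hr : l.reverse.filter p ≠ [] := by
    rw [List.filter_reverse]
    intro hh
    exact h (by simpa using congrArg List.reverse hh)
  obtain ⟨A, x, R, hrev, hx, hA⟩ := pvFindP p l.reverse hr
  refine ⟨R.reverse, x, A.reverse, ?_, hx, ?_⟩
  · have := congrArg List.reverse hrev
    simpa using this
  · intro c hc; exact hA c (by simpa using hc)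

-- getD / set at the seam of an append
theorem pvGetD_mid (u : List Char) (x : Char) (v : List Char) :
    (u ++ x :: v).getD u.length ' ' = x := by
  induction u with
  | nil => rfl
  | cons a u ih => simpa using ih

theorem pvSet_mid (u : List Char) (x c : Char) (v : List Char) :
    (u ++ x :: v).set u.length c = u ++ c :: v := by
  induction u with
  | nil => rfl
  | cons a u ih => simpa using ih

-- characterisation of the inner whiles
theorem pvSkipF_stop_ge (want : Bool) (l : List Char) (i j : Nat) (h : ¬ i < j) :
    pvSkipF want l i j = i := by
  unfold pvSkipF; rw [dif_neg]; simp [h]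

theorem pvSkipF_stop_p (want : Bool) (l : List Char) (i j : Nat)
    (h : (pvIsLow (l.getD i ' ') == want) = true) : pvSkipF want l i j = i := by
  have hb : ¬ (i < j ∧ (pvIsLow (l.getD i ' ') != want) = true) := by
    simp only [bne, Bool.not_eq_true', h]
    intro hcon
    exact absurd hcon.2 (by simp)
  unfold pvSkipF; rw [dif_neg hb]

theorem pvSkipB_stop_ge (want : Bool) (l : List Char) (i j : Nat) (h : ¬ i < j) :
    pvSkipB want l i j = j := by
  unfold pvSkipB; rw [dif_neg]; simp [h]

theorem pvSkipB_stop_p (want : Bool) (l : List Char) (i j : Nat)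
    (h : (pvIsLow (l.getD j ' ') == want) = true) : pvSkipB want l i j = j := by
  have hb : ¬ (i < j ∧ (pvIsLow (l.getD j ' ') != want) = true) := by
    simp only [bne, Bool.not_eq_true', h]
    intro hcon
    exact absurd hcon.2 (by simp)
  unfold pvSkipB; rw [dif_neg hb]

theorem pvSkipF_adv (want : Bool) (A : List Char) (u v : List Char) (j : Nat)
    (hA : ∀ c ∈ A, (pvIsLow c == want) = false) (hj : u.length + A.length ≤ j) :
    pvSkipF want (u ++ A ++ v) u.length j = pvSkipF want (u ++ A ++ v) (u.length + A.length) j := by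
  induction A generalizing u with
  | nil => simp
  | cons a A ih =>
    have hlt : u.length < j := by simp at hj; omega
    have hchar : (u ++ (a :: A) ++ v).getD u.length ' ' = a := by
      rw [List.append_assoc, List.cons_append]
      exact pvGetD_mid u a (A ++ v)
    rw [show pvSkipF want (u ++ (a :: A) ++ v) u.length j
          = pvSkipF want (u ++ (a :: A) ++ v) (u.length + 1) j by
        conv_lhs => rw [pvSkipF]
        rw [dif_pos ⟨hlt, by simp [bne, hchar, hA a List.mem_cons_self]⟩]]
    have heq : u ++ (a :: A) ++ v = (u ++ [a]) ++ A ++ v := by simp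
    have := ih (u ++ [a])
      (fun c hc => hA c (List.mem_cons_of_mem a hc))
      (by simp only [List.length_append, List.length_cons, List.length_nil] at hj ⊢; omega)
    rw [heq]
    simp only [List.length_append, List.length_cons, List.length_nil] at this ⊢
    have h2 : u.length + (A.length + 1) = u.length + 1 + A.length := by omega
    rw [h2]
    simpa using this

theorem pvSkipB_adv (want : Bool) (B : List Char) (u v : List Char) (i : Nat)
    (hB : ∀ c ∈ B, (pvIsLow c == want) = false) (hi : i < u.length) :
    pvSkipB want (u ++ B ++ v) i (u.length + B.length - 1)
      = pvSkipB want (u ++ B ++ v) i (u.length - 1) := by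
  induction B using List.reverseRecOn generalizing v with
  | nil => simp
  | append_singleton B b ih =>
    have hchar : (u ++ (B ++ [b]) ++ v).getD (u ++ B).length ' ' = b := by
      rw [show u ++ (B ++ [b]) ++ v = (u ++ B) ++ b :: v by simp]
      exact pvGetD_mid (u ++ B) b v
    have hlt : i < (u ++ B).length := by simp; omega
    have hj : u.length + (B ++ [b]).length - 1 = (u ++ B).length := by simp
    rw [hj]
    rw [show pvSkipB want (u ++ (B ++ [b]) ++ v) i (u ++ B).length
          = pvSkipB want (u ++ (B ++ [b]) ++ v) i ((u ++ B).length - 1) by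
        conv_lhs => rw [pvSkipB]
        rw [dif_pos ⟨hlt, by simp [bne, hchar, hB b (by simp)]⟩]]
    have heq : u ++ (B ++ [b]) ++ v = u ++ B ++ ([b] ++ v) := by simp
    have := ih ([b] ++ v) (fun c hc => hB c (by simp [hc]))
    rw [heq]
    have h2 : (u ++ B).length - 1 = u.length + B.length - 1 := by simp
    rw [h2]
    exact this

-- the outer while on the segment seg of pre ++ seg ++ suf reverses seg's p-elements in place
theorem pvTpSeg (want : Bool) (seg pre suf : List Char) (hne : seg ≠ []) :
    pvTpLoop want (pre ++ seg ++ suf) pre.length (pre.length + seg.length - 1)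
      = pre ++ pvRvp (fun c => pvIsLow c == want) seg ++ suf := by
  by_cases hp : seg.filter (fun c => pvIsLow c == want) = []
  · -- no target in seg: both inner whiles meet, nothing is swapped, and pvRvp is the identity
    have hall : ∀ c ∈ seg, (pvIsLow c == want) = false := by
      intro c hc
      have := List.filter_eq_nil_iff.mp hp c hc
      simpa using this
    rw [pvRvp_nop _ _ hp]
    by_cases hij : pre.length < pre.length + seg.length - 1
    · obtain ⟨B, b, hsegd⟩ : ∃ B b, seg = B ++ [b] :=
        ⟨seg.dropLast, seg.getLast hne, (List.dropLast_append_getLast hne).symm⟩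
      have hshape : pre ++ seg ++ suf = pre ++ B ++ (b :: suf) := by rw [hsegd]; simp
      have hlen : seg.length = B.length + 1 := by rw [hsegd]; simp
      have hF : pvSkipF want (pre ++ seg ++ suf) pre.length (pre.length + seg.length - 1)
          = pre.length + seg.length - 1 := by
        rw [hshape]
        rw [pvSkipF_adv want B pre (b :: suf) (pre.length + seg.length - 1)
          (fun c hc => hall c (by rw [hsegd]; exact List.mem_append_left _ hc))
          (by omega)]
        rw [pvSkipF_stop_ge _ _ _ _ (by omega)]
        omega
      have hB2 : pvSkipB want (pre ++ seg ++ suf) (pre.length + seg.length - 1)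
          (pre.length + seg.length - 1) = pre.length + seg.length - 1 :=
        pvSkipB_stop_ge _ _ _ _ (by omega)
      rw [pvTpLoop, dif_pos hij]
      simp only [hF, hB2]
      rw [dif_neg (by omega)]
    · rw [pvTpLoop, dif_neg hij]
  · -- there is a target: find first (x) and last (y) target of seg
    obtain ⟨A, x, S, hseg, hpx, hA⟩ := pvFindP _ seg hp
    have hfxS : (x :: S).filter (fun c => pvIsLow c == want) ≠ [] := by
      simp [List.filter_cons, hpx]
    obtain ⟨M, y, Bs, hxS, hpy, hBs⟩ := pvFindPLast _ (x :: S) hfxS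
    have hlenS : seg.length = A.length + S.length + 1 := by rw [hseg]; simp; omega
    have hF : pvSkipF want (pre ++ seg ++ suf) pre.length (pre.length + seg.length - 1)
        = pre.length + A.length := by
      rw [show pre ++ seg ++ suf = pre ++ A ++ (x :: (S ++ suf)) by rw [hseg]; simp]
      rw [pvSkipF_adv want A pre (x :: (S ++ suf)) (pre.length + seg.length - 1) hA (by omega)]
      apply pvSkipF_stop_p
      rw [show pre.length + A.length = (pre ++ A).length by simp]
      rw [show pre ++ A ++ (x :: (S ++ suf)) = (pre ++ A) ++ x :: (S ++ suf) by simp]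
      rw [pvGetD_mid]
      exact hpx
    cases M with
    | nil =>
      -- x is the only target from x onwards: pointers meet, list unchanged, pvRvp = id
      have hxy : x = y ∧ S = Bs := by
        have := hxS; simp at this; exact ⟨this.1, this.2⟩
      obtain ⟨rfl, rfl⟩ := hxy
      have hrv : pvRvp (fun c => pvIsLow c == want) seg = seg := by
        rw [hseg, pvRvp_left _ _ _ hA, pvRvp_single _ _ _ hpx hBs]
      rw [hrv]
      by_cases hij : pre.length < pre.length + seg.length - 1
      · have hB2 : pvSkipB want (pre ++ seg ++ suf) (pre.length + A.length)
            (pre.length + seg.length - 1) = pre.length + A.length := by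
          rw [show pre ++ seg ++ suf = (pre ++ A ++ [x]) ++ S ++ suf by rw [hseg]; simp]
          rw [show pre.length + seg.length - 1 = (pre ++ A ++ [x]).length + S.length - 1 by
            simp; omega]
          rw [pvSkipB_adv want S (pre ++ A ++ [x]) suf (pre.length + A.length) hBs
            (by simp only [List.length_append, List.length_cons, List.length_nil]; omega)]
          rw [show (pre ++ A ++ [x]).length - 1 = pre.length + A.length by
            simp only [List.length_append, List.length_cons, List.length_nil]; omega]
          exact pvSkipB_stop_ge _ _ _ _ (by omega)
        rw [pvTpLoop, dif_pos hij]
        simp only [hF, hB2]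
        rw [dif_neg (by omega)]
      · rw [pvTpLoop, dif_neg hij]
    | cons x2 M2 =>
      -- two distinct targets: swap x and y and recurse on the strict middle M2
      have hxM : x2 = x ∧ S = M2 ++ y :: Bs := by
        have := hxS; simp at this; exact ⟨this.1.symm, this.2⟩
      obtain ⟨rfl, rfl⟩ := hxM
      have hlen : seg.length = A.length + M2.length + Bs.length + 2 := by
        rw [hseg]; simp only [List.length_append, List.length_cons, List.length_nil]; omega
      have hij : pre.length < pre.length + seg.length - 1 := by omega
      have hB2 : pvSkipB want (pre ++ seg ++ suf) (pre.length + A.length)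
          (pre.length + seg.length - 1) = pre.length + A.length + M2.length + 1 := by
        rw [show pre ++ seg ++ suf = (pre ++ A ++ x2 :: M2 ++ [y]) ++ Bs ++ suf by
          rw [hseg]; simp]
        rw [show pre.length + seg.length - 1
            = (pre ++ A ++ x2 :: M2 ++ [y]).length + Bs.length - 1 by simp only [List.length_append, List.length_cons, List.length_nil]; omega]
        rw [pvSkipB_adv want Bs (pre ++ A ++ x2 :: M2 ++ [y]) suf (pre.length + A.length) hBs (by simp only [List.length_append, List.length_cons, List.length_nil]; omega)]
        rw [show (pre ++ A ++ x2 :: M2 ++ [y]).length - 1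
            = (pre ++ A ++ x2 :: M2).length by simp only [List.length_append, List.length_cons, List.length_nil]; omega]
        rw [show (pre ++ A ++ x2 :: M2 ++ [y]) ++ Bs ++ suf
            = (pre ++ A ++ x2 :: M2) ++ y :: (Bs ++ suf) by simp]
        rw [pvSkipB_stop_p _ _ _ _ (by rw [pvGetD_mid]; exact hpy)]
        simp only [List.length_append, List.length_cons, List.length_nil]; omega
      have hgi : (pre ++ seg ++ suf).getD (pre.length + A.length) ' ' = x2 := by
        rw [show pre ++ seg ++ suf = (pre ++ A) ++ x2 :: (M2 ++ y :: (Bs ++ suf)) by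
          rw [hseg]; simp]
        rw [show pre.length + A.length = (pre ++ A).length by simp]
        exact pvGetD_mid _ _ _
      have hgj : (pre ++ seg ++ suf).getD (pre.length + A.length + M2.length + 1) ' ' = y := by
        rw [show pre ++ seg ++ suf = (pre ++ A ++ x2 :: M2) ++ y :: (Bs ++ suf) by
          rw [hseg]; simp]
        rw [show pre.length + A.length + M2.length + 1 = (pre ++ A ++ x2 :: M2).length by
          simp only [List.length_append, List.length_cons, List.length_nil]; omega]
        exact pvGetD_mid _ _ _
      have hset : ((pre ++ seg ++ suf).set (pre.length + A.length) y).set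
            (pre.length + A.length + M2.length + 1) x2
          = (pre ++ A ++ y :: M2) ++ x2 :: (Bs ++ suf) := by
        rw [show pre ++ seg ++ suf = (pre ++ A) ++ x2 :: (M2 ++ y :: (Bs ++ suf)) by
          rw [hseg]; simp]
        rw [show pre.length + A.length = (pre ++ A).length by simp]
        rw [pvSet_mid]
        rw [show (pre ++ A) ++ y :: (M2 ++ y :: (Bs ++ suf))
            = (pre ++ A ++ y :: M2) ++ y :: (Bs ++ suf) by simp]
        rw [show (pre ++ A).length + M2.length + 1 = (pre ++ A ++ y :: M2).length by simp only [List.length_append, List.length_cons, List.length_nil]; omega]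
        rw [pvSet_mid]
      have hrec : pvTpLoop want ((pre ++ A ++ y :: M2) ++ x2 :: (Bs ++ suf))
            (pre.length + A.length + 1) (pre.length + A.length + M2.length + 1 - 1)
          = (pre ++ A ++ [y]) ++ pvRvp (fun c => pvIsLow c == want) M2 ++ (x2 :: (Bs ++ suf)) := by
        cases hM2 : M2 with
        | nil =>
          rw [pvTpLoop, dif_neg (by simp only [List.length_append, List.length_cons, List.length_nil]; omega)]
          simp [pvRvp, pvFill]
        | cons m M3 =>
          have := pvTpSeg want (m :: M3) (pre ++ A ++ [y]) (x2 :: (Bs ++ suf))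
            (by simp)
          rw [show (pre ++ A ++ [y]) ++ (m :: M3) ++ (x2 :: (Bs ++ suf))
              = (pre ++ A ++ y :: (m :: M3)) ++ x2 :: (Bs ++ suf) by simp] at this
          rw [show (pre ++ A ++ [y]).length = pre.length + A.length + 1 by simp only [List.length_append, List.length_cons, List.length_nil]] at this
          rw [show pre.length + A.length + 1 + (m :: M3).length - 1
              = pre.length + A.length + (m :: M3).length by simp only [List.length_append, List.length_cons, List.length_nil]; omega] at this
          rw [show pre.length + A.length + (m :: M3).length + 1 - 1
              = pre.length + A.length + (m :: M3).length by simp only [List.length_append, List.length_cons, List.length_nil]; omega]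
          exact this
      rw [pvTpLoop, dif_pos hij]
      simp only [hF, hB2]
      rw [dif_pos (by omega), hgi, hgj, hset, hrec]
      rw [hseg]
      rw [show A ++ x2 :: (M2 ++ y :: Bs) = A ++ ((x2 :: (M2 ++ [y])) ++ Bs) by simp]
      rw [pvRvp_left _ _ _ hA, pvRvp_right _ _ _ hBs, pvRvp_swap _ _ _ _ hpx hpy]
      simp
termination_by seg.length
decreasing_by
  simp only [hseg, hM2, List.length_append, List.length_cons]
  omega

theorem pvTpFull (want : Bool) (l : List Char) :
    pvTpLoop want l 0 (l.length - 1) = pvRvp (fun c => pvIsLow c == want) l := by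
  cases l with
  | nil => rw [pvTpLoop, dif_neg (by simp)]; simp [pvRvp, pvFill]
  | cons c t =>
    have := pvTpSeg want (c :: t) [] [] (by simp)
    simpa using this

-- after the letter pass the non-letter characters are unchanged in place
theorem pvFill_filter_neg (p : Char → Bool) (t str : List Char)
    (hstr : ∀ a ∈ str, p a = true) :
    (pvFill p t str).filter (fun c => !p c) = t.filter (fun c => !p c) := by
  induction t generalizing str with
  | nil => rfl
  | cons c t ih =>
    by_cases hc : p c
    · cases str with
      | nil => simp [pvFill, hc, List.filter_cons, ih [] (by simp)]
      | cons a str' =>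
        have hpa : p a = true := hstr a List.mem_cons_self
        simp [pvFill, hc, List.filter_cons, hpa,
          ih str' (fun b hb => hstr b (List.mem_cons_of_mem a hb))]
    · simp [pvFill, hc, List.filter_cons, ih str hstr]

-- second pass over the first pass's output = the two-stream merge
theorem pvMergeTwo (t s1 s2 : List Char)
    (h1 : ∀ a ∈ s1, pvIsLow a = true)
    (hl1 : s1.length = t.countP pvIsLow)
    (hl2 : s2.length = t.countP (fun c => !(pvIsLow c))) :
    pvFill (fun c => !(pvIsLow c)) (pvFill pvIsLow t s1) s2 = pvMerge t s1 s2 := by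
  induction t generalizing s1 s2 with
  | nil => simp [pvFill, pvMerge]
  | cons c t ih =>
    by_cases hc : pvIsLow c
    · obtain ⟨a, s1', rfl⟩ : ∃ a s1', s1 = a :: s1' := by
        cases s1 with
        | nil => exfalso; rw [List.countP_cons_of_pos hc] at hl1; simp at hl1
        | cons a s1' => exact ⟨a, s1', rfl⟩
      have hpa : pvIsLow a = true := h1 a List.mem_cons_self
      simp only [pvFill, pvMerge, hc, hpa, Bool.not_true, if_true,
        Bool.false_eq_true, if_false]
      exact congrArg (List.cons a)
        (ih s1' s2 (fun b hb => h1 b (List.mem_cons_of_mem a hb))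
          (by rw [List.countP_cons_of_pos hc] at hl1; simpa using hl1)
          (by rw [List.countP_cons_of_neg (by simp [hc])] at hl2; exact hl2))
    · obtain ⟨b, s2', rfl⟩ : ∃ b s2', s2 = b :: s2' := by
        cases s2 with
        | nil =>
          exfalso
          rw [List.countP_cons_of_pos (by simp [hc])] at hl2
          simp at hl2
        | cons b s2' => exact ⟨b, s2', rfl⟩
      have hc' : pvIsLow c = false := by simpa using hc
      simp only [pvFill, pvMerge, hc', Bool.not_false, if_true,
        Bool.false_eq_true, if_false]
      exact congrArg (List.cons b)
        (ih s1 s2' h1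
          (by rw [List.countP_cons_of_neg (by simpa using hc)] at hl1; exact hl1)
          (by rw [List.countP_cons_of_pos (by simp [hc])] at hl2; simpa using hl2))

-- ===== VERDICT (by name: the statement is the Claim_ definition above) =====
theorem reverseByType_spec : Claim_equal_reverseByType := by
  intro s _
  unfold Spec_reverseByType reverseByType reverseByType_alt
  simp only [pvCollect_spec, PySem.List.slice?_none_none_neg_one, Option.getD_some]
  rw [pvMain (s.toList) 0 (List.replicate s.toList.length "")
        ((s.toList.filter pvIsLow).reverse) ((s.toList.filter (fun c => !(pvIsLow c))).reverse)
        (by rw [List.length_reverse, ← List.countP_eq_length_filter])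
        (by rw [List.length_reverse, ← List.countP_eq_length_filter])
        (by simp)]
  rw [pvTpFull, pvTpFull]
  have e1 : (fun c => pvIsLow c == true) = pvIsLow := by funext c; cases pvIsLow c <;> rfl
  have e2 : (fun c => pvIsLow c == false) = (fun c => !(pvIsLow c)) := by
    funext c; cases pvIsLow c <;> rfl
  rw [e1, e2]
  have hmem : ∀ a ∈ (s.toList.filter pvIsLow).reverse, pvIsLow a = true := by
    intro a ha
    exact (List.mem_filter.mp (List.mem_reverse.mp ha)).2
  have hfil : (pvRvp pvIsLow s.toList).filter (fun c => !(pvIsLow c))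
      = s.toList.filter (fun c => !(pvIsLow c)) := by
    unfold pvRvp
    exact pvFill_filter_neg pvIsLow s.toList _ hmem
  rw [show pvRvp (fun c => !(pvIsLow c)) (pvRvp pvIsLow s.toList)
      = pvMerge s.toList ((s.toList.filter pvIsLow).reverse)
          ((s.toList.filter (fun c => !(pvIsLow c))).reverse) by
    conv_lhs => rw [pvRvp]
    rw [hfil]
    conv_lhs => rw [pvRvp]
    exact pvMergeTwo s.toList _ _ hmem
      (by rw [List.length_reverse, ← List.countP_eq_length_filter])
      (by rw [List.length_reverse, ← List.countP_eq_length_filter])]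
  simp
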